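-- pv_equiv track=rewrite | github.com/NehoraiHadad/Podcasto | Lambda/telegram-lambda/src/channel_processor.py | _calculate_media_stats
-- ===== SOURCE A (Python) =====
-- from typing import Dict, Any, List, Optional
--
-- def _calculate_media_stats(messages: List[Dict[str, Any]], channel: str) -> Dict[str, Dict[str, int]]:
--     """Calculate media statistics."""
--     media_stats = {
--         channel: {
--             'image': sum(1 for msg in messages if msg.get('media_info') and 'Image' in msg.get('media_info', '')),
--             'video': sum(1 for msg in messages if msg.get('media_info') and 'Video' in msg.get('media_info', '')),
--             'audio': sum(1 for msg in messages if msg.get('media_info') and 'Audio' in msg.get('media_info', '')),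
--             'file': sum(1 for msg in messages if msg.get('media_info') and 'File' in msg.get('media_info', '')),
--             'download_failed': sum(1 for msg in messages if msg.get('media_info') and 'failed' in msg.get('media_info', ''))
--         }
--     }
--     return media_stats
-- ===== SOURCE B (Python) =====
-- def _calculate_media_stats(messages, channel):
--     """Calculate media statistics in a single pass over messages."""
--     image = video = audio = file = failed = 0
--     for msg in messages:
--         mi = msg.get('media_info')
--         if mi:
--             if 'Image' in mi:
--                 image += 1
--             if 'Video' in mi:
--                 video += 1
--             if 'Audio' in mi:
--                 audio += 1
--             if 'File' in mi:
--                 file += 1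
--             if 'failed' in mi:
--                 failed += 1
--     return {channel: {'image': image, 'video': video, 'audio': audio,
--                       'file': file, 'download_failed': failed}}
-- ===== Notes on version B (the rewrite author's own statement) =====
-- stated objective: simpler
-- what changed: Replaces five separate generator-expression passes (one per media category) with a single loop over messages that looks up media_info once per message and bumps five independent counters.
import Mathlib
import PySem

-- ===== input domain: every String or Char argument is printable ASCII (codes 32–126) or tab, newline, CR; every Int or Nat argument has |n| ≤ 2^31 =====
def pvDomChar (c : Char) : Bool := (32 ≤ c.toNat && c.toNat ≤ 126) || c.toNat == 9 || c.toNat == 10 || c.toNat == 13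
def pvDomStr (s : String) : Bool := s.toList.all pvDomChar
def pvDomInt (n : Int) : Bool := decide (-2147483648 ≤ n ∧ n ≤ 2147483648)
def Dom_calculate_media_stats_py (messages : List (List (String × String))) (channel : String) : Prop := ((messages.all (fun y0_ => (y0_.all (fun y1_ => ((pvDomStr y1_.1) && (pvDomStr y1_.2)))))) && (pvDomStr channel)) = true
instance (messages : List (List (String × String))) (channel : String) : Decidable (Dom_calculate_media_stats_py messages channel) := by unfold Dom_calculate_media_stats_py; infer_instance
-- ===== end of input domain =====

-- B replaces A's five counting passes over messages with one loop carrying five counters (simpler, one traversal).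


-- ===== PORT A =====
-- truthiness of an Optional[str]
def pyTruthyA (o : Option String) : Bool :=
  match o with
  | none => false
  | some s => !(s == "")

-- 'msg.get('media_info') and sub in msg.get('media_info', '')' as a Bool
def aCond (msg : List (String × String)) (sub : String) : Bool :=
  pyTruthyA ((PySem.Dict.mk msg).get? "media_info") &&
    PySem.Str.isIn sub (((PySem.Dict.mk msg).get? "media_info").getD "")

-- sum(1 for msg in messages if <cond>)
def aSum (messages : List (List (String × String))) (sub : String) : Int :=
  messages.foldl (fun acc msg => if aCond msg sub then acc + 1 else acc) 0

def calculate_media_stats_py (messages : List (List (String × String))) (channel : String) : List (String × List (String × Int)) :=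
  [(channel,
    [("image", aSum messages "Image"),
     ("video", aSum messages "Video"),
     ("audio", aSum messages "Audio"),
     ("file", aSum messages "File"),
     ("download_failed", aSum messages "failed")])]

-- ===== PORT B =====
-- one step of B's loop: look media_info up once, bump the five counters independently
def bStep (c : Int × Int × Int × Int × Int) (msg : List (String × String)) : Int × Int × Int × Int × Int :=
  match (PySem.Dict.mk msg).get? "media_info" with
  | none => c
  | some mi =>
    if mi == "" then c
    else
      ((if PySem.Str.isIn "Image" mi then c.1 + 1 else c.1),
       (if PySem.Str.isIn "Video" mi then c.2.1 + 1 else c.2.1),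
       (if PySem.Str.isIn "Audio" mi then c.2.2.1 + 1 else c.2.2.1),
       (if PySem.Str.isIn "File" mi then c.2.2.2.1 + 1 else c.2.2.2.1),
       (if PySem.Str.isIn "failed" mi then c.2.2.2.2 + 1 else c.2.2.2.2))

def calculate_media_stats_py_alt (messages : List (List (String × String))) (channel : String) : List (String × List (String × Int)) :=
  let c := messages.foldl bStep (0, 0, 0, 0, 0)
  [(channel,
    [("image", c.1), ("video", c.2.1), ("audio", c.2.2.1),
     ("file", c.2.2.2.1), ("download_failed", c.2.2.2.2)])]

-- ===== PRECONDITION & SPEC =====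
def Spec_calculate_media_stats_py (messages : List (List (String × String))) (channel : String) (out : List (String × List (String × Int))) : Prop := out = calculate_media_stats_py_alt messages channel
instance (messages : List (List (String × String))) (channel : String) (out : List (String × List (String × Int))) : Decidable (Spec_calculate_media_stats_py messages channel out) := by unfold Spec_calculate_media_stats_py; infer_instance

-- ===== CLAIM (what is proved, stated in full; the proofs are below) =====
def Claim_equal_calculate_media_stats_py : Prop := ∀ (messages : List (List (String × String))) (channel : String), Dom_calculate_media_stats_py messages channel → Spec_calculate_media_stats_py messages channel (calculate_media_stats_py messages channel)

-- ===== LEMMAS AND PROOFS =====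

-- B's fold computes, in each component, the start value plus A's count of the corresponding condition
theorem bFold_eq (messages : List (List (String × String))) (c : Int × Int × Int × Int × Int) :
    messages.foldl bStep c =
      (c.1 + (messages.countP (fun m => aCond m "Image") : Int),
       c.2.1 + (messages.countP (fun m => aCond m "Video") : Int),
       c.2.2.1 + (messages.countP (fun m => aCond m "Audio") : Int),
       c.2.2.2.1 + (messages.countP (fun m => aCond m "File") : Int),
       c.2.2.2.2 + (messages.countP (fun m => aCond m "failed") : Int)) := by
  induction messages generalizing c with
  | nil => simp
  | cons msg rest ih =>
    simp only [List.foldl_cons, ih, List.countP_cons]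
    have hcond : ∀ sub : String,
        aCond msg sub =
          (match (PySem.Dict.mk msg).get? "media_info" with
           | none => false
           | some mi => !(mi == "") && PySem.Str.isIn sub mi) := by
      intro sub
      unfold aCond pyTruthyA
      cases (PySem.Dict.mk msg).get? "media_info" with
      | none => simp
      | some mi => simp
    simp only [bStep, hcond]
    cases h : (PySem.Dict.mk msg).get? "media_info" with
    | none => simp
    | some mi =>
      by_cases hmi : mi == ""
      · simp [hmi]
      · simp [hmi, Prod.ext_iff]
        refine ⟨?_, ?_, ?_, ?_, ?_⟩ <;> split_ifs <;> ring

theorem aSum_eq (messages : List (List (String × String))) (sub : String) :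
    aSum messages sub = (messages.countP (fun m => aCond m sub) : Int) := by
  unfold aSum
  rw [PySem.List.foldl_if_add_one]
  simp

-- ===== VERDICT (by name: the statement is the Claim_ definition above) =====
theorem calculate_media_stats_py_spec : Claim_equal_calculate_media_stats_py := by
  intro messages channel _
  unfold Spec_calculate_media_stats_py calculate_media_stats_py calculate_media_stats_py_alt
  simp only [bFold_eq, aSum_eq]
  norm_num
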